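-- pv_equiv track=rewrite | github.com/Raouf216/intern-automation | bots/end-of-day-scraper/app/main.py | failure_parts_for_step
-- ===== SOURCE A (Python) =====
-- SELF_PICKUP_ORDER_TYPE = "self pickup"
--
-- EOD_ORDER_LIST_TYPE = "eod"
--
-- PICKUP_READY_ORDER_LIST_TYPE = "pickup_ready"
--
-- EXCEL_EXPORT_ORDER_LIST_TYPE = "excel_export"
--
-- def notification_order_list_type(order_type):
--     if order_type == SELF_PICKUP_ORDER_TYPE:
--         return PICKUP_READY_ORDER_LIST_TYPE
--
--     return EOD_ORDER_LIST_TYPE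
--
-- def failure_parts_for_step(failed_step, steps, targets):
--     if failed_step in {"export_eod_excel_to_n8n", "send_excel_export_notification"}:
--         return [EXCEL_EXPORT_ORDER_LIST_TYPE]
--
--     pending_order_type = next(
--         (
--             step.get("order_type")
--             for step in reversed(steps)
--             if step.get("ok") is None and step.get("order_type")
--         ),
--         None,
--     )
--
--     if pending_order_type:
--         return [notification_order_list_type(pending_order_type)]
--
--     if failed_step == "upsert_supabase":
--         return list(dict.fromkeys(notification_order_list_type(target["order_type"]) for target in targets))
--
--     last_order_type = next(
--         (step.get("order_type") for step in reversed(steps) if step.get("order_type")),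
--         None,
--     )
--
--     return [notification_order_list_type(last_order_type)] if last_order_type else [EOD_ORDER_LIST_TYPE]
-- ===== SOURCE B (Python) =====
-- SELF_PICKUP_ORDER_TYPE = "self pickup"
-- EOD_ORDER_LIST_TYPE = "eod"
-- PICKUP_READY_ORDER_LIST_TYPE = "pickup_ready"
-- EXCEL_EXPORT_ORDER_LIST_TYPE = "excel_export"
--
--
-- def _list_type(order_type):
--     if order_type == SELF_PICKUP_ORDER_TYPE:
--         return PICKUP_READY_ORDER_LIST_TYPE
--     return EOD_ORDER_LIST_TYPE
--
--
-- def failure_parts_for_step(failed_step, steps, targets):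
--     if failed_step in ("export_eod_excel_to_n8n", "send_excel_export_notification"):
--         return [EXCEL_EXPORT_ORDER_LIST_TYPE]
--
--     # One FORWARD pass over steps with overwriting accumulators: the last
--     # qualifying step seen forward is exactly the first one A's reversed()
--     # scans would find, so no reversed(), no generators, no early exit.
--     pending = None
--     last = None
--     for step in steps:
--         ot = step.get("order_type")
--         if ot:
--             last = ot
--             if step.get("ok") is None:
--                 pending = ot
--
--     if pending:
--         return [_list_type(pending)]
--
--     if failed_step == "upsert_supabase":
--         out = []
--         for target in targets:
--             lt = _list_type(target["order_type"])
--             if lt not in out: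
--                 out.append(lt)
--         return out
--
--     return [_list_type(last)] if last else [EOD_ORDER_LIST_TYPE]
-- ===== Notes on version B (the rewrite author's own statement) =====
-- stated objective: alternative
-- what changed: A scans reversed(steps) twice with next() generators (early-exit search for the first pending order_type, then for the first order_type) and dedups with dict.fromkeys; B never reverses: one forward pass over steps with two overwriting accumulators (the last qualifying step forward equals the first one in reverse), then an explicit seen-list dedup loop.
-- outside the precondition, e.g. on failure_parts_for_step('upsert_supabase', [], [{}]): A raises KeyError, B raises KeyError
import Mathlib
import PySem

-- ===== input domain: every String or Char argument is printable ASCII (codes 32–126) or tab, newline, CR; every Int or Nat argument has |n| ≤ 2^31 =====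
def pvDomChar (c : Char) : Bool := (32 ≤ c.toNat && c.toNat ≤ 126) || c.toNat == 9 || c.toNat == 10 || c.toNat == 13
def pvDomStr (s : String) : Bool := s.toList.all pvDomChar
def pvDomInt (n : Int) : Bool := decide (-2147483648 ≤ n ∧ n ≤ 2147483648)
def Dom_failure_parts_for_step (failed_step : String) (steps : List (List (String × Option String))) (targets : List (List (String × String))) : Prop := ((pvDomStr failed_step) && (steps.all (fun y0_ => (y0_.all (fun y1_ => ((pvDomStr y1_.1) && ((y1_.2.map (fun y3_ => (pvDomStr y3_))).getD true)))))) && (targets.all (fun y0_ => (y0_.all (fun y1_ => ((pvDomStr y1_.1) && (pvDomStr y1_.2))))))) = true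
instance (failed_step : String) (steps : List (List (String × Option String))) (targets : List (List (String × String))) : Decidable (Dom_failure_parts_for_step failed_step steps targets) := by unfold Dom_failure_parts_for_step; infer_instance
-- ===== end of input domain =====

-- B replaces A's two reversed() early-exit scans by one forward pass with overwriting
-- accumulators and an explicit seen-list dedup (objective: alternative, same cost).
-- Return-value equivalence only; neither program mutates its arguments.

-- shared module-level helpers (Python constants / notification_order_list_type)
-- step.get(k): dict built from the assoc list (later duplicate wins), missing key or stored None -> none
def pyStepGet (step : List (String × Option String)) (k : String) : Option String :=
  ((PySem.Dict.ofList step).get? k).getD none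

-- Python truthiness of an Optional[str]
def otTruthy : Option String → Bool
  | some s => s != ""
  | none => false

def notifType (order_type : String) : String :=
  if order_type = "self pickup" then "pickup_ready" else "eod"

-- ===== PORT A =====
-- next((step.get("order_type") for step in reversed(steps) if step.get("ok") is None and step.get("order_type")), None)
def findPendingA : List (List (String × Option String)) → Option String
  | [] => none
  | step :: rest =>
      if pyStepGet step "ok" = none ∧ otTruthy (pyStepGet step "order_type")
      then pyStepGet step "order_type"
      else findPendingA rest

-- next((step.get("order_type") for step in reversed(steps) if step.get("order_type")), None)
def findLastA : List (List (String × Option String)) → Option String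
  | [] => none
  | step :: rest =>
      if otTruthy (pyStepGet step "order_type")
      then pyStepGet step "order_type"
      else findLastA rest

def failure_parts_for_step (failed_step : String) (steps : List (List (String × Option String))) (targets : List (List (String × String))) : List String :=
  if failed_step = "export_eod_excel_to_n8n" ∨ failed_step = "send_excel_export_notification" then
    ["excel_export"]
  else
    let pending := findPendingA steps.reverse
    if otTruthy pending then
      [notifType (pending.getD "")]
    else if failed_step = "upsert_supabase" then
      -- target["order_type"]: KeyError when absent; total via getD "", excluded by Pre_
      PySem.List.dedup (targets.map (fun t => notifType (((PySem.Dict.ofList t).get? "order_type").getD "")))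
    else
      let last := findLastA steps.reverse
      if otTruthy last then [notifType (last.getD "")] else ["eod"]

-- ===== PORT B =====
-- B's forward loop body: overwrite last on any truthy order_type, pending when additionally ok is None
def stepUpd (s : Option String × Option String) (step : List (String × Option String)) : Option String × Option String :=
  let ot := pyStepGet step "order_type"
  if otTruthy ot then
    if pyStepGet step "ok" = none then (ot, ot) else (s.1, ot)
  else s

-- B's explicit seen-list dedup loop
def dedupB (xs : List String) : List String :=
  xs.foldl (fun acc x => if x ∈ acc then acc else acc ++ [x]) []

def failure_parts_for_step_alt (failed_step : String) (steps : List (List (String × Option String))) (targets : List (List (String × String))) : List String :=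
  if failed_step = "export_eod_excel_to_n8n" ∨ failed_step = "send_excel_export_notification" then
    ["excel_export"]
  else
    let r := steps.foldl stepUpd (none, none)
    if otTruthy r.1 then
      [notifType (r.1.getD "")]
    else if failed_step = "upsert_supabase" then
      -- target["order_type"]: KeyError when absent; total via getD "", excluded by Pre_
      dedupB (targets.map (fun t => notifType (((PySem.Dict.ofList t).get? "order_type").getD "")))
    else
      if otTruthy r.2 then [notifType (r.2.getD "")] else ["eod"]

-- ===== PRECONDITION & SPEC =====
-- Pre_ excludes only inputs where Python A raises KeyError: failed_step = "upsert_supabase",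
-- no pending step, and some target lacks the key "order_type" (B raises the same KeyError there).
def Pre_failure_parts_for_step (failed_step : String) (steps : List (List (String × Option String))) (targets : List (List (String × String))) : Prop :=
  failed_step = "upsert_supabase" →
  (∀ step ∈ steps, ¬(pyStepGet step "ok" = none ∧ otTruthy (pyStepGet step "order_type"))) →
  ∀ t ∈ targets, ((PySem.Dict.ofList t).get? "order_type").isSome
instance (failed_step : String) (steps : List (List (String × Option String))) (targets : List (List (String × String))) : Decidable (Pre_failure_parts_for_step failed_step steps targets) := by unfold Pre_failure_parts_for_step; infer_instance

def pvWitness_failure_parts_for_step : String × (List (List (String × Option String))) × (List (List (String × String))) :=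
  ("upsert_supabase", [[("ok", some "y"), ("order_type", some "self pickup")]], [[("order_type", "x")]])

def Spec_failure_parts_for_step (failed_step : String) (steps : List (List (String × Option String))) (targets : List (List (String × String))) (out : List String) : Prop := out = failure_parts_for_step_alt failed_step steps targets
instance (failed_step : String) (steps : List (List (String × Option String))) (targets : List (List (String × String))) (out : List String) : Decidable (Spec_failure_parts_for_step failed_step steps targets out) := by unfold Spec_failure_parts_for_step; infer_instance

-- ===== CLAIM (what is proved, stated in full; the proofs are below) =====
def Claim_equal_failure_parts_for_step : Prop := ∀ (failed_step : String) (steps : List (List (String × Option String))) (targets : List (List (String × String))), Dom_failure_parts_for_step failed_step steps targets → Pre_failure_parts_for_step failed_step steps targets → Spec_failure_parts_for_step failed_step steps targets (failure_parts_for_step failed_step steps targets)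

-- ===== LEMMAS AND PROOFS =====

theorem truthy_or (o s : Option String) (h : otTruthy o = true) : o.or s = o := by
  cases o with
  | none => simp [otTruthy] at h
  | some v => rfl

theorem findPendingA_append (a b : List (List (String × Option String))) :
    findPendingA (a ++ b) = (findPendingA a).or (findPendingA b) := by
  induction a with
  | nil => rfl
  | cons x rest ih =>
      simp only [List.cons_append, findPendingA, ih]
      split_ifs with h
      · cases hv : pyStepGet x "order_type" with
        | none => rw [hv] at h; simp [otTruthy] at h
        | some s => rfl
      · rfl

theorem findLastA_append (a b : List (List (String × Option String))) :
    findLastA (a ++ b) = (findLastA a).or (findLastA b) := by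
  induction a with
  | nil => rfl
  | cons x rest ih =>
      simp only [List.cons_append, findLastA, ih]
      split_ifs with h
      · cases hv : pyStepGet x "order_type" with
        | none => rw [hv] at h; simp [otTruthy] at h
        | some s => rfl
      · rfl

theorem foldl_stepUpd (l : List (List (String × Option String))) (s : Option String × Option String) :
    l.foldl stepUpd s = ((findPendingA l.reverse).or s.1, (findLastA l.reverse).or s.2) := by
  induction l generalizing s with
  | nil => simp [findPendingA, findLastA]
  | cons x rest ih =>
      simp only [List.foldl_cons, ih, List.reverse_cons, findPendingA_append, findLastA_append,
        Option.or_assoc]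
      congr 1
      · -- pending component: (stepUpd s x).1 = (findPendingA [x]).or s.1
        congr 1
        simp only [findPendingA, stepUpd]
        split_ifs with h1 h2 h3 h4 <;> simp_all [truthy_or _ s.1]
      · -- last component: (stepUpd s x).2 = (findLastA [x]).or s.2
        congr 1
        simp only [findLastA, stepUpd]
        split_ifs <;> simp_all [truthy_or _ s.2]

theorem dedupB_eq (xs : List String) : dedupB xs = PySem.List.dedup xs := by
  have hf : (fun (acc : List String) (x : String) => if x ∈ acc then acc else acc ++ [x]) = PySem.Set.add := by
    funext acc x
    rw [PySem.Set.add_eq_ite]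
  rw [PySem.List.dedup_eq_ofList, PySem.Set.ofList_eq_foldl, dedupB, hf]

-- ===== VERDICT (by name: the statement is the Claim_ definition above) =====
theorem failure_parts_for_step_spec : Claim_equal_failure_parts_for_step := by
  intro failed_step steps targets _hDom _hPre
  unfold Spec_failure_parts_for_step failure_parts_for_step failure_parts_for_step_alt
  by_cases hx : failed_step = "export_eod_excel_to_n8n" ∨ failed_step = "send_excel_export_notification"
  · simp [hx]
  · simp only [hx, if_false]
    rw [foldl_stepUpd]
    simp only [Option.or_none]
    by_cases hp : otTruthy (findPendingA steps.reverse) = true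
    · simp [hp]
    · simp only [hp, if_false, Bool.false_eq_true]
      by_cases hu : failed_step = "upsert_supabase"
      · simp [hu, dedupB_eq]
      · simp only [hu, if_false]
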